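-- pv_equiv track=rewrite | github.com/alvarosamp/RagMatchAvancado | Pncp/apiPncp/ata_downloader2.py | determinar_status_final
-- ===== SOURCE A (Python) =====
-- from typing import Dict, List, Optional, Tuple
--
-- def determinar_status_final(logs: List[Dict]) -> str:
--     """
--     Regras:
--     - Baixado: encontrou ata e baixou ao menos 1 arquivo
--     - Sem ata: não encontrou ata
--     - Falhou no processo: qualquer outro caso com erro ou sem download útil
--     """
--     if not logs:
--         return "Falhou no processo"
--
--     statuses = [log.get("status", "") for log in logs]
--
--     if "baixado" in statuses:
--         return "Baixado"
--
--     if "sem_atas" in statuses: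
--         return "Sem ata"
--
--     if "ata_sem_documentos" in statuses:
--         return "Ata sem documentos"
--
--     return "Falhou no processo"
-- ===== SOURCE B (Python) =====
-- _PRIORITY = {"baixado": (0, "Baixado"),
--              "sem_atas": (1, "Sem ata"),
--              "ata_sem_documentos": (2, "Ata sem documentos")}
--
-- def determinar_status_final(logs):
--     if not logs:
--         return "Falhou no processo"
--     best = None
--     for log in logs:
--         entry = _PRIORITY.get(log.get("status", ""))
--         if entry is not None and (best is None or entry[0] < best[0]):
--             best = entry
--     return best[1] if best is not None else "Falhou no processo"
-- ===== Notes on version B (the rewrite author's own statement) =====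
-- stated objective: alternative
-- what changed: Replaces the list of statuses plus three sequential membership scans with a single pass over the logs that tracks the minimum rank in a prebuilt priority table.
import Mathlib
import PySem

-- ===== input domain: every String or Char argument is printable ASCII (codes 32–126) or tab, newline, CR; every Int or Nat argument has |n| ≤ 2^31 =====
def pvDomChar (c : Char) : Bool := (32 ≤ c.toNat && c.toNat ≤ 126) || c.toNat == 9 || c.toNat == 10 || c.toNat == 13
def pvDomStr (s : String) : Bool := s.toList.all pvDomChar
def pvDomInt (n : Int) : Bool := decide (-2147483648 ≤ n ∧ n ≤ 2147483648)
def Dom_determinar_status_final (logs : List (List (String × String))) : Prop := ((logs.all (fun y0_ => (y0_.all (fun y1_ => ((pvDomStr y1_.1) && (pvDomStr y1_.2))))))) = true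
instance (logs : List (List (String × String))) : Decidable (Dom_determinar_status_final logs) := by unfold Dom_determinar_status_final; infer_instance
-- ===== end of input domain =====

-- B is an alternative decomposition: one pass tracking the minimum rank in a priority
-- table, instead of A's status-list projection plus three sequential membership scans.

-- ===== PORT A =====
-- log.get("status", "") on a dict given as an association list (first match wins)
def pvGetStatus (log : List (String × String)) : String :=
  (PySem.Dict.mk log).getD "status" ""

def determinar_status_final (logs : List (List (String × String))) : String :=
  if logs = [] then "Falhou no processo"
  else
    let statuses := logs.map (fun log => pvGetStatus log)
    if statuses.contains "baixado" then "Baixado"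
    else if statuses.contains "sem_atas" then "Sem ata"
    else if statuses.contains "ata_sem_documentos" then "Ata sem documentos"
    else "Falhou no processo"

-- ===== PORT B =====
-- the module-level _PRIORITY table
def pvPriority : PySem.Dict String (Nat × String) :=
  PySem.Dict.mk
    [("baixado", (0, "Baixado")),
     ("sem_atas", (1, "Sem ata")),
     ("ata_sem_documentos", (2, "Ata sem documentos"))]

-- loop body: keep the entry with the smaller rank
def pvStep (best : Option (Nat × String)) (log : List (String × String)) :
    Option (Nat × String) :=
  match pvPriority.get? (pvGetStatus log) with
  | none => best
  | some e =>
    match best with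
    | none => some e
    | some b => if e.1 < b.1 then some e else some b

def determinar_status_final_alt (logs : List (List (String × String))) : String :=
  if logs = [] then "Falhou no processo"
  else
    match logs.foldl pvStep none with
    | some b => b.2
    | none => "Falhou no processo"

-- ===== PRECONDITION & SPEC =====
def Spec_determinar_status_final (logs : List (List (String × String))) (out : String) : Prop := out = determinar_status_final_alt logs
instance (logs : List (List (String × String))) (out : String) : Decidable (Spec_determinar_status_final logs out) := by unfold Spec_determinar_status_final; infer_instance

-- ===== CLAIM (what is proved, stated in full; the proofs are below) =====
def Claim_equal_determinar_status_final : Prop := ∀ (logs : List (List (String × String))), Dom_determinar_status_final logs → Spec_determinar_status_final logs (determinar_status_final logs)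

-- ===== LEMMAS AND PROOFS =====

-- merge of two optional bests, the denotation of the accumulator
def pvMerge (a b : Option (Nat × String)) : Option (Nat × String) :=
  match a, b with
  | none, b => b
  | some x, none => some x
  | some x, some y => if y.1 < x.1 then some y else some x

lemma pvStep_eq_merge (best : Option (Nat × String)) (log : List (String × String)) :
    pvStep best log = pvMerge best (pvPriority.get? (pvGetStatus log)) := by
  unfold pvStep pvMerge
  cases pvPriority.get? (pvGetStatus log) <;> cases best <;> simp

lemma pvMerge_assoc (a b c : Option (Nat × String)) :
    pvMerge (pvMerge a b) c = pvMerge a (pvMerge b c) := by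
  rcases a with _ | x
  · rfl
  rcases b with _ | y
  · rfl
  rcases c with _ | z
  · simp only [pvMerge]; split_ifs <;> rfl
  by_cases h1 : y.1 < x.1 <;> by_cases h2 : z.1 < y.1 <;> by_cases h3 : z.1 < x.1 <;>
    simp [pvMerge, h1, h2, h3] <;> omega

lemma foldl_pvStep (acc : Option (Nat × String)) (logs : List (List (String × String))) :
    logs.foldl pvStep acc = pvMerge acc (logs.foldl pvStep none) := by
  induction logs generalizing acc with
  | nil => cases acc <;> rfl
  | cons l t ih =>
    simp only [List.foldl_cons, pvStep_eq_merge]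
    rw [ih, ih (pvMerge none _), pvMerge_assoc]
    rfl

-- characterisation of B's fold by the three memberships over the statuses
lemma fold_char (logs : List (List (String × String))) :
    logs.foldl pvStep none =
      (if (logs.map pvGetStatus).contains "baixado" then some (0, "Baixado")
       else if (logs.map pvGetStatus).contains "sem_atas" then some (1, "Sem ata")
       else if (logs.map pvGetStatus).contains "ata_sem_documentos" then some (2, "Ata sem documentos")
       else none) := by
  induction logs with
  | nil => simp
  | cons l t ih =>
    rw [List.foldl_cons, pvStep_eq_merge, foldl_pvStep, ih]
    have hnone : pvMerge none (pvPriority.get? (pvGetStatus l)) = pvPriority.get? (pvGetStatus l) := rfl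
    rw [hnone]
    by_cases h0 : pvGetStatus l = "baixado"
    · have hc : ((l :: t).map pvGetStatus).contains "baixado" = true := by simp [h0]
      rw [if_pos hc, h0]
      have hg : pvPriority.get? "baixado" = some (0, "Baixado") := rfl
      rw [hg]
      split_ifs <;> simp_all [pvMerge]
    · by_cases h1 : pvGetStatus l = "sem_atas"
      · have hg : pvPriority.get? (pvGetStatus l) = some (1, "Sem ata") := by rw [h1]; rfl
        have hb : ((l :: t).map pvGetStatus).contains "baixado" = ((t.map pvGetStatus).contains "baixado") := by
          simp [Ne.symm h0]
        have hs : ((l :: t).map pvGetStatus).contains "sem_atas" = true := by simp [h1]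
        rw [hg, hb, hs]
        split_ifs <;> simp_all [pvMerge]
      · by_cases h2 : pvGetStatus l = "ata_sem_documentos"
        · have hg : pvPriority.get? (pvGetStatus l) = some (2, "Ata sem documentos") := by rw [h2]; rfl
          have hb : ((l :: t).map pvGetStatus).contains "baixado" = ((t.map pvGetStatus).contains "baixado") := by
            simp [Ne.symm h0]
          have hs : ((l :: t).map pvGetStatus).contains "sem_atas" = ((t.map pvGetStatus).contains "sem_atas") := by
            simp [Ne.symm h1]
          have ha : ((l :: t).map pvGetStatus).contains "ata_sem_documentos" = true := by simp [h2]
          rw [hg, hb, hs, ha]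
          split_ifs <;> simp_all [pvMerge]
        · have hg : pvPriority.get? (pvGetStatus l) = none := by
            simp [pvPriority, PySem.Dict.get?, Ne.symm h0, Ne.symm h1, Ne.symm h2]
          have hb : ((l :: t).map pvGetStatus).contains "baixado" = ((t.map pvGetStatus).contains "baixado") := by
            simp [Ne.symm h0]
          have hs : ((l :: t).map pvGetStatus).contains "sem_atas" = ((t.map pvGetStatus).contains "sem_atas") := by
            simp [Ne.symm h1]
          have ha : ((l :: t).map pvGetStatus).contains "ata_sem_documentos" = ((t.map pvGetStatus).contains "ata_sem_documentos") := by
            simp [Ne.symm h2]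
          rw [hg, hb, hs, ha]
          split_ifs <;> simp_all [pvMerge]

-- ===== VERDICT (by name: the statement is the Claim_ definition above) =====
theorem determinar_status_final_spec : Claim_equal_determinar_status_final := by
  intro logs _
  unfold Spec_determinar_status_final determinar_status_final determinar_status_final_alt
  rw [fold_char]
  by_cases he : logs = []
  · simp [he]
  · simp only [if_neg he]
    split_ifs <;> rfl
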